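-- pv_equiv track=rewrite | github.com/towcalenieszynek/matura | statystyki/statystyka.py | najdluzszy_ciag_spolglosek
-- ===== SOURCE A (Python) =====
-- def najdluzszy_ciag_spolglosek(slowo):
--     samogloski = 'AEIOUY'
--     max_dlugosc = 0
--     aktualna_dlugosc = 0
--
--     for litera in slowo:
--         if litera not in samogloski:
--             aktualna_dlugosc += 1
--             max_dlugosc = max(max_dlugosc, aktualna_dlugosc)
--         else:
--             aktualna_dlugosc = 0
--
--     return max_dlugosc
-- ===== SOURCE B (Python) =====
-- def najdluzszy_ciag_spolglosek(slowo):
--     best = 0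
--     i = 0
--     n = len(slowo)
--     while i < n:
--         if slowo[i] in 'AEIOUY':
--             i += 1
--         else:
--             j = i + 1
--             while j < n and slowo[j] not in 'AEIOUY':
--                 j += 1
--             if j - i > best:
--                 best = j - i
--             i = j
--     return best
-- ===== Notes on version B (the rewrite author's own statement) =====
-- stated objective: alternative
-- what changed: B segments the word into maximal consonant runs with a two-pointer scan (inner loop finds the end of each run, then jumps there), instead of A's per-character running counter updated with max at every character.
import Mathlib
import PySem

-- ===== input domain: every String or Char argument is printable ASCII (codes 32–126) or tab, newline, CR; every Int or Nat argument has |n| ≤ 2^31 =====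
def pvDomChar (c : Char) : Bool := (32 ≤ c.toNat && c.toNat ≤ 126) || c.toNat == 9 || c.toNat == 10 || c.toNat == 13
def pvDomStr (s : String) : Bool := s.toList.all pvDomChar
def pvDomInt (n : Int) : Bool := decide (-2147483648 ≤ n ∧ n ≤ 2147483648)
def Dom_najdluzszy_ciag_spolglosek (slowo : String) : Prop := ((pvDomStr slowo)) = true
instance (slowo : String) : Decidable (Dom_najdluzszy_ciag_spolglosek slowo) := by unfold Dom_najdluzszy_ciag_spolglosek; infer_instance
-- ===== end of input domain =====

-- B replaces A's per-character running counter by a two-pointer scan over maximal consonant runs (alternative decomposition, same O(n) cost).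

-- ===== PORT A =====
-- A: fold over the characters carrying (max_dlugosc, aktualna_dlugosc)
def najdluzszy_ciag_spolglosek (slowo : String) : Int :=
  (slowo.toList.foldl
    (fun (st : Int × Int) (litera : Char) =>
      if !(("AEIOUY".toList).contains litera) then
        (max st.1 (st.2 + 1), st.2 + 1)
      else
        (st.1, 0))
    (0, 0)).1

-- ===== PORT B =====
-- B: outer while loop over the list; a vowel is skipped, a consonant starts a run
-- whose end the inner while loop finds (= takeWhile over the rest), then we jump past it.
def pvAltGo : List Char → Int → Int
  | [], best => best
  | c :: rest, best =>
    if ("AEIOUY".toList).contains c then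
      pvAltGo rest best
    else
      -- inner while loop: run length = 1 + length of consonant prefix of rest
      let k : Int := 1 + ((rest.takeWhile (fun d => !(("AEIOUY".toList).contains d))).length : Int)
      pvAltGo (rest.dropWhile (fun d => !(("AEIOUY".toList).contains d))) (max best k)
termination_by l _ => l.length
decreasing_by
  · simp
  · exact Nat.lt_succ_of_le (List.length_dropWhile_le _ _)

def najdluzszy_ciag_spolglosek_alt (slowo : String) : Int :=
  pvAltGo slowo.toList 0

-- ===== PRECONDITION & SPEC =====
def Spec_najdluzszy_ciag_spolglosek (slowo : String) (out : Int) : Prop := out = najdluzszy_ciag_spolglosek_alt slowo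
instance (slowo : String) (out : Int) : Decidable (Spec_najdluzszy_ciag_spolglosek slowo out) := by unfold Spec_najdluzszy_ciag_spolglosek; infer_instance

-- ===== CLAIM (what is proved, stated in full; the proofs are below) =====
def Claim_equal_najdluzszy_ciag_spolglosek : Prop := ∀ (slowo : String), Dom_najdluzszy_ciag_spolglosek slowo → Spec_najdluzszy_ciag_spolglosek slowo (najdluzszy_ciag_spolglosek slowo)

-- ===== LEMMAS AND PROOFS =====

def pvNv (c : Char) : Bool := !(("AEIOUY".toList).contains c)

def pvF (l : List Char) (m c : Int) : Int :=
  (l.foldl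
    (fun (st : Int × Int) (litera : Char) =>
      if !(("AEIOUY".toList).contains litera) then
        (max st.1 (st.2 + 1), st.2 + 1)
      else
        (st.1, 0))
    (m, c)).1

theorem pvF_nil (m c : Int) : pvF [] m c = m := rfl

theorem pvF_cons (x : List Char) (d : Char) (m c : Int) :
    pvF (d :: x) m c =
      if pvNv d then pvF x (max m (c + 1)) (c + 1) else pvF x m 0 := by
  simp only [pvF, pvNv, List.foldl]
  split <;> rfl

-- skipping one maximal consonant prefix at once
theorem pvF_run (l : List Char) (m c : Int) (h : c ≤ m) :
    pvF l m c =
      pvF (l.dropWhile pvNv) (max m (c + ((l.takeWhile pvNv).length : Int)))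
        (c + ((l.takeWhile pvNv).length : Int)) := by
  induction l generalizing m c with
  | nil => simp [pvF_nil, max_eq_left h]
  | cons d t ih =>
    by_cases hd : pvNv d = true
    · rw [pvF_cons]
      rw [if_pos hd]
      rw [List.dropWhile_cons_of_pos hd, List.takeWhile_cons_of_pos hd]
      rw [ih (max m (c + 1)) (c + 1) (le_max_right _ _)]
      have h1 : max (max m (c + 1)) (c + 1 + ((t.takeWhile pvNv).length : Int))
          = max m (c + (1 + ((t.takeWhile pvNv).length : Int))) := by
        have : (0:Int) ≤ ((t.takeWhile pvNv).length : Int) := by positivity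
        omega
      simp only [List.length_cons]
      push_cast
      rw [h1]
      ring_nf
    · have hd' : pvNv d = false := by simpa using hd
      rw [List.dropWhile_cons_of_neg (by simp [hd']), List.takeWhile_cons_of_neg (by simp [hd'])]
      simp [max_eq_left h]

theorem pv_dropWhile_head (p : Char → Bool) :
    ∀ (l : List Char) (v : Char) (u : List Char), l.dropWhile p = v :: u → p v = false := by
  intro l
  induction l with
  | nil => intro v u h; simp at h
  | cons a t ih =>
    intro v u h
    by_cases ha : p a = true
    · rw [List.dropWhile_cons_of_pos ha] at h
      exact ih v u h
    · have ha' : p a = false := by simpa using ha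
      rw [List.dropWhile_cons_of_neg (by simp [ha'])] at h
      cases h
      exact ha'

theorem pv_main : ∀ (n : ℕ) (l : List Char) (m : Int), l.length ≤ n →
    pvF l m 0 = pvAltGo l m := by
  intro n
  induction n with
  | zero =>
    intro l m hl
    have : l = [] := List.eq_nil_of_length_eq_zero (Nat.le_zero.mp hl)
    subst this; simp [pvF, pvAltGo]
  | succ n ih =>
    intro l m hl
    match l with
    | [] => simp [pvF, pvAltGo]
    | d :: t =>
      by_cases hd : pvNv d = true
      · -- consonant head: whole run at once
        rw [pvF_cons, if_pos hd]
        have hstep := pvF_run t (max m 1) 1 (le_max_right _ _)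
        rw [show (0:Int) + 1 = 1 by ring] at *
        rw [hstep]
        have hmax : max (max m 1) (1 + ((t.takeWhile pvNv).length : Int))
            = max m (1 + ((t.takeWhile pvNv).length : Int)) := by
          have : (0:Int) ≤ ((t.takeWhile pvNv).length : Int) := by positivity
          omega
        rw [hmax]
        have hgoal : pvAltGo (d :: t) m
            = pvAltGo (t.dropWhile pvNv) (max m (1 + ((t.takeWhile pvNv).length : Int))) := by
          rw [pvAltGo]
          have hdv : (("AEIOUY".toList).contains d) = false := by
            unfold pvNv at hd
            simp only [Bool.not_eq_eq_eq_not, Bool.not_true] at hd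
            exact hd
          simp only [hdv, Bool.false_eq_true, if_false]
          rfl
        rw [hgoal]
        -- the dropped-to list is empty or starts with a vowel
        match hdw : t.dropWhile pvNv with
        | [] => simp [pvF, pvAltGo]
        | v :: u =>
          have hv : pvNv v = false := pv_dropWhile_head pvNv t v u hdw
          have hvc : (("AEIOUY".toList).contains v) = true := by
            unfold pvNv at hv
            simp only [Bool.not_eq_eq_eq_not, Bool.not_false] at hv
            exact hv
          rw [pvF_cons, if_neg (by simp [hv])]
          rw [pvAltGo]
          rw [if_pos hvc]
          apply ih
          have h1 : (v :: u).length ≤ t.length := hdw ▸ List.length_dropWhile_le _ _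
          simp only [List.length_cons] at h1 hl
          omega
      · -- vowel head
        have hd' : pvNv d = false := by simpa using hd
        rw [pvF_cons, if_neg (by simp [hd'])]
        have hdv : (("AEIOUY".toList).contains d) = true := by
          unfold pvNv at hd'
          simp only [Bool.not_eq_eq_eq_not, Bool.not_false] at hd'
          exact hd'
        rw [pvAltGo, if_pos hdv]
        apply ih
        simp only [List.length_cons] at hl
        omega

-- ===== VERDICT (by name: the statement is the Claim_ definition above) =====
theorem najdluzszy_ciag_spolglosek_spec : Claim_equal_najdluzszy_ciag_spolglosek := by
  intro slowo _
  unfold Spec_najdluzszy_ciag_spolglosek najdluzszy_ciag_spolglosek najdluzszy_ciag_spolglosek_alt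
  exact pv_main slowo.toList.length slowo.toList 0 le_rfl
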